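-- pv_equiv track=rewrite | github.com/alybryn/Advent-of-Code | 2024/code/4.py | buildV
-- ===== SOURCE A (Python) =====
-- def buildV(puzzle):
--     m = []
--     for i in range(0, len(puzzle[0])):
--         s = ""
--         for j in range(0, len(puzzle)):
--             s += puzzle[j][i]
--         m.append(s)
--     return m
-- ===== SOURCE B (Python) =====
-- def buildV(puzzle):
--     w = len(puzzle[0])
--     flat = "".join(row[:w] for row in puzzle)
--     return [flat[k::w] for k in range(w)]
-- ===== Notes on version B (the rewrite author's own statement) =====
-- stated objective: alternative
-- what changed: Instead of A's nested per-cell index loops building each column by repeated string concatenation, B flattens the grid into one string (rows truncated to the first row's width) and extracts each column as a single stride slice flat[k::w].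
import Mathlib
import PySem

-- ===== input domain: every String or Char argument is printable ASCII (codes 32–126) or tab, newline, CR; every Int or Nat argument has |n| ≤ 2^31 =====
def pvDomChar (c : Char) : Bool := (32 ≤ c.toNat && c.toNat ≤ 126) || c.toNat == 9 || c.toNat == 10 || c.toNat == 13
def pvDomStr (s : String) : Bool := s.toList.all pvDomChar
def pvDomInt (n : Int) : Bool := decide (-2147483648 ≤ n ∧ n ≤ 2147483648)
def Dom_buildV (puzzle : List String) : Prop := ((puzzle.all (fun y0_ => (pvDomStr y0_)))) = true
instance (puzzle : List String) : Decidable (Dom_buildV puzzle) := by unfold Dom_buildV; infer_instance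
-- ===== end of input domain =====

-- B replaces A's nested per-cell index loops by flattening the grid into one
-- string and reading each column off as a single stride slice flat[k::w]
-- (alternative algorithm/data structure; same asymptotic cost).

-- ===== PORT A =====
-- for i in range(0, len(puzzle[0])): s = ""; for j in range(0, len(puzzle)): s += puzzle[j][i]; m.append(s)
def buildV (puzzle : List String) : List String :=
  (PySem.List.pyRange 0 (PySem.Str.len (PySem.List.pyGetD puzzle 0 "")) 1).foldl
    (fun m i =>
      m ++ [String.ofList
        ((PySem.List.pyRange 0 (PySem.List.len puzzle) 1).foldl
          (fun s j => s ++ [PySem.List.pyGetD (PySem.List.pyGetD puzzle j "").toList i ' ']) [])])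
    []

-- ===== PORT B =====
-- w = len(puzzle[0]); flat = "".join(row[:w] for row in puzzle); [flat[k::w] for k in range(w)]
-- flat[k::w] never raises; slice? is none only for step 0, and inside the map w ≥ 1, so getD [] is exact.
def buildV_alt (puzzle : List String) : List String :=
  let w : Int := PySem.Str.len (PySem.List.pyGetD puzzle 0 "")
  let flat : String := PySem.Str.join "" (puzzle.map (fun r => PySem.Str.slice r none (some w)))
  (PySem.List.pyRange 0 w 1).map (fun k =>
    String.ofList ((PySem.List.slice? flat.toList (some k) none w).getD []))

-- ===== PRECONDITION & SPEC =====
-- Pre_ excludes exactly the inputs on which A raises IndexError: the empty grid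
-- (puzzle[0]) and grids where some row is shorter than the first row (puzzle[j][i]).
def Pre_buildV (puzzle : List String) : Prop :=
  puzzle ≠ [] ∧ ∀ s ∈ puzzle, (puzzle.headD "").toList.length ≤ s.toList.length
instance (puzzle : List String) : Decidable (Pre_buildV puzzle) := by
  unfold Pre_buildV; infer_instance
def pvWitness_buildV : List String := ["abc", "def"]

def Spec_buildV (puzzle : List String) (out : List String) : Prop := out = buildV_alt puzzle
instance (puzzle : List String) (out : List String) : Decidable (Spec_buildV puzzle out) := by
  unfold Spec_buildV; infer_instance

-- ===== CLAIM (what is proved, stated in full; the proofs are below) =====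
def Claim_equal_buildV : Prop :=
  ∀ (puzzle : List String), Dom_buildV puzzle → Pre_buildV puzzle → Spec_buildV puzzle (buildV puzzle)

-- ===== LEMMAS AND PROOFS =====

-- A's value in closed form: column k of the grid, for k < length of the first row.
theorem buildV_closed (p : String) (ps : List String) :
    buildV (p :: ps) =
      (List.range p.toList.length).map
        (fun k => String.ofList ((p :: ps).map (fun s => s.toList.getD k ' '))) := by
  unfold buildV
  rw [PySem.List.pyGetD_zero_cons]
  rw [show PySem.Str.len p = ((p.toList.length : Nat) : Int) from by simp [PySem.Str.len_eq]]
  rw [PySem.List.pyRange_zero_natCast]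
  rw [List.foldl_map, PySem.List.foldl_append_singleton_eq_map, List.nil_append]
  refine List.map_congr_left (fun k _ => ?_)
  congr 1
  rw [PySem.List.foldl_pyRange_zero_pyGetD (p :: ps) "" (fun s row => s ++ [PySem.List.pyGetD row.toList k ' ']) []]
  rw [PySem.List.foldl_append_singleton_eq_map, List.nil_append]
  simp

-- "".join over chars is concatenation.
theorem join_nil_eq_flatten (l : List (List Char)) : PySem.Chars.join [] l = l.flatten := by
  induction l with
  | nil => rfl
  | cons a t ih =>
    cases t with
    | nil => simp [PySem.Chars.join, List.intercalate, List.intersperse]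
    | cons b u =>
      simp only [PySem.Chars.join, List.intercalate, List.intersperse] at *
      simp [ih]

-- slice? with nonnegative in-range start, no stop and positive step, evaluated.
theorem slice?_stride {α : Type} (xs : List α) (k w : Nat) (hw : 0 < w) (hk : k < xs.length) :
    PySem.List.slice? xs (some (k:Int)) none (w:Int) =
      some ((List.range ((xs.length - k + w - 1)/w)).filterMap (fun j => xs[k + w*j]?)) := by
  have hc : ((xs.length : Int) - k + w - 1) = ((xs.length - k + w - 1 : Nat) : Int) := by omega
  simp only [PySem.List.slice?, PySem.List.sliceIndices]
  rw [if_neg (show ¬((w:Int) = 0) from by omega)]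
  rw [if_neg (show ¬((w:Int) < 0) from by omega), if_neg (show ¬((w:Int) < 0) from by omega),
      if_neg (show ¬((w:Int) < 0) from by omega)]
  rw [if_neg (show ¬((k:Int) < 0) from by omega)]
  rw [min_eq_left (by exact_mod_cast hk.le)]
  rw [if_pos (show (0:Int) < w from by omega)]
  rw [if_pos (show (k:Int) < xs.length from by exact_mod_cast hk)]
  congr 1
  rw [hc, ← Int.natCast_ediv, Int.toNat_natCast]
  apply List.filterMap_congr
  intro j _
  congr 1

-- number of elements the stride slice takes out of n rows of width w
theorem count_eq (n w k : Nat) (hw : 0 < w) (hk : k < w) (hn : 0 < n) :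
    (n * w - k + w - 1) / w = n := by
  obtain ⟨m, rfl⟩ := Nat.exists_eq_add_of_le hn
  have e : (1 + m) * w - k + w - 1 = w * (1 + m) + (w - 1 - k) := by
    have h1 : (1 + m) * w = m * w + w := by ring
    have h2 : w * (1 + m) = m * w + w := by ring
    rw [h1, h2]
    omega
  rw [e, Nat.mul_add_div hw, Nat.div_eq_of_lt (by omega), Nat.add_zero]

-- the stride picks out entry k of each uniform-width chunk
theorem stride_cols (rows : List (List Char)) (w k : Nat) (hk : k < w)
    (h : ∀ c ∈ rows, c.length = w) :
    (List.range rows.length).filterMap (fun j => rows.flatten[k + w*j]?) =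
      rows.map (fun c => c.getD k ' ') := by
  induction rows with
  | nil => simp
  | cons c rest ih =>
    have hc : c.length = w := h c List.mem_cons_self
    rw [List.length_cons, List.range_succ_eq_map, List.filterMap_cons, List.filterMap_map]
    have h0 : (c :: rest).flatten[k + w * 0]? = some (c.getD k ' ') := by
      rw [List.flatten_cons, Nat.mul_zero, Nat.add_zero,
          List.getElem?_append_left (by omega)]
      rw [List.getElem?_eq_getElem (by omega)]
      rw [List.getD_eq_getElem c ' ' (by omega)]
    rw [h0]
    have hrest : ∀ j : Nat,
        ((fun j => (c :: rest).flatten[k + w * j]?) ∘ Nat.succ) j =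
          rest.flatten[k + w * j]? := by
      intro j
      have hge : w ≤ w * j.succ := Nat.le_mul_of_pos_right w (Nat.succ_pos j)
      have hm : w * j.succ = w * j + w := Nat.mul_succ w j
      simp only [Function.comp, List.flatten_cons]
      rw [List.getElem?_append_right (by omega)]
      congr 1
      omega
    rw [List.filterMap_congr (fun j _ => hrest j)]
    rw [ih (fun x hx => h x (List.mem_cons_of_mem _ hx))]
    simp

-- total length of uniform-width chunks
theorem flatten_len_uniform (rows : List (List Char)) (w : Nat)
    (h : ∀ c ∈ rows, c.length = w) : rows.flatten.length = rows.length * w := by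
  induction rows with
  | nil => simp
  | cons c rest ih =>
    rw [List.flatten_cons, List.length_append, h c List.mem_cons_self,
        ih (fun x hx => h x (List.mem_cons_of_mem _ hx)), List.length_cons]
    ring

-- B's value in closed form, under the row-length precondition.
theorem buildV_alt_closed (p : String) (ps : List String)
    (hlen : ∀ s ∈ p :: ps, p.toList.length ≤ s.toList.length) :
    buildV_alt (p :: ps) =
      (List.range p.toList.length).map
        (fun k => String.ofList ((p :: ps).map (fun s => s.toList.getD k ' '))) := by
  unfold buildV_alt
  simp only [PySem.List.pyGetD_zero_cons]
  rw [show PySem.Str.len p = ((p.toList.length : Nat) : Int) from by simp [PySem.Str.len_eq]]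
  set wn := p.toList.length with hw
  set chunks : List (List Char) := (p :: ps).map (fun s => s.toList.take wn) with hch
  have hflat : (PySem.Str.join ""
      ((p :: ps).map (fun r => PySem.Str.slice r none (some (wn : Int))))).toList =
      chunks.flatten := by
    rw [PySem.Str.toList_join, List.map_map]
    have : ((fun s : String => s.toList) ∘ fun r => PySem.Str.slice r none (some (wn : Int))) =
        fun s : String => s.toList.take wn := by
      funext r
      simp only [Function.comp]
      rw [PySem.Str.toList_slice, PySem.Chars.slice_eq_listSlice, PySem.List.slice_to_natCast]
    rw [show ("" : String).toList = ([] : List Char) from rfl, this, join_nil_eq_flatten, ← hch]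
  rw [hflat, PySem.List.pyRange_zero_natCast, List.map_map]
  refine List.map_congr_left (fun k hkmem => ?_)
  have hk : k < wn := List.mem_range.mp hkmem
  have hchw : ∀ c ∈ chunks, c.length = wn := by
    intro c hc
    rcases List.mem_map.mp hc with ⟨s, hs, rfl⟩
    rw [List.length_take]
    exact min_eq_left (hlen s hs)
  have hfl : chunks.flatten.length = chunks.length * wn := flatten_len_uniform chunks wn hchw
  have hchn : 0 < chunks.length := by simp [hch]
  simp only [Function.comp]
  rw [slice?_stride chunks.flatten k wn (by omega) (by rw [hfl]; calc
        k < wn := hk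
        _ ≤ chunks.length * wn := Nat.le_mul_of_pos_left wn hchn)]
  rw [hfl, count_eq chunks.length wn k (by omega) hk hchn]
  rw [stride_cols chunks wn k hk hchw]
  rw [Option.getD_some]
  congr 1
  rw [hch, List.map_map]
  refine List.map_congr_left (fun s hs => ?_)
  simp only [Function.comp]
  rw [List.getD_eq_getElem?_getD, List.getD_eq_getElem?_getD,
      List.getElem?_take, if_pos hk]

-- ===== VERDICT (by name: the statement is the Claim_ definition above) =====
theorem buildV_spec : Claim_equal_buildV := by
  intro puzzle _ hpre
  obtain ⟨hne, hlen⟩ := hpre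
  cases puzzle with
  | nil => exact absurd rfl hne
  | cons p ps =>
    unfold Spec_buildV
    rw [buildV_closed, buildV_alt_closed p ps (by simpa using hlen)]
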